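-- pv_equiv track=rewrite | github.com/mageshyt/INTERVIEW-PREP | lintcoder/7.worthy-rook.py | worthy_rook
-- ===== SOURCE A (Python) =====
-- from typing import List
-- from collections import deque
--
-- def worthy_rook(board: List[List[str]]) -> int:
--     rows,cols=len(board),len(board[0])
--
--     # find the rook
--     queue = deque()
--
--     for i in range(rows):
--         for j in range(cols):
--             if board[i][j] == 'R':
--                 queue.append((i,j,0))
--                 break
--
--     # rook can move only in 4 directions
--
--     directions = [(0,1),(0,-1),(1,0),(-1,0)]
--     visited = set()
--     while queue:
--         x,y,moves = queue.popleft()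
--
--         # check if the rook has reached the destination
--         if (x,y) == (7,7):
--             return moves
--
--         for dx,dy in directions:
--             nx,ny = x+dx, y+dy
--             while 0<=nx<rows and 0<=ny<cols and board[nx][ny] != 'P':
--                 if (nx,ny) not in visited:
--                     visited.add((nx,ny))
--                     queue.append((nx,ny,moves+1))
--                 nx,ny = nx+dx, ny+dy
--
--
--     return -1
-- ===== SOURCE B (Python) =====
-- from typing import List
-- from collections import deque
--
-- def worthy_rook(board: List[List[str]]) -> int:
--     rows, cols = len(board), len(board[0])
--
--     def ray(x, y, dx, dy):
--         out = []
--         nx, ny = x + dx, y + dy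
--         while 0 <= nx < rows and 0 <= ny < cols and board[nx][ny] != 'P':
--             out.append((nx, ny))
--             nx, ny = nx + dx, ny + dy
--         return out
--
--     # adjacency table built once: slide-reachable cells of every non-'P' cell
--     adj = [[(ray(x, y, 0, 1) + ray(x, y, 0, -1) + ray(x, y, 1, 0) + ray(x, y, -1, 0))
--             if board[x][y] != 'P' else []
--             for y in range(cols)] for x in range(rows)]
--
--     # seed: the first 'R' of each row
--     queue = deque()
--     for i, row in enumerate(board):
--         r = row[:cols]
--         if 'R' in r:
--             queue.append((i, r.index('R'), 0))
--
--     visited = set()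
--     while queue:
--         x, y, d = queue.popleft()
--         if (x, y) == (7, 7):
--             return d
--         for c in adj[x][y]:
--             if c not in visited:
--                 visited.add(c)
--                 queue.append((c[0], c[1], d + 1))
--     return -1
-- ===== Notes on version B (the rewrite author's own statement) =====
-- stated objective: alternative
-- what changed: B first builds a per-cell adjacency table (all cells a rook slide reaches from each non-'P' cell in the four directions) and then runs a plain BFS over that precomputed graph, seeding each row's first 'R' via slice/index, instead of A's BFS that re-walks the four slide rays inline at every dequeue.
-- outside the precondition, e.g. on worthy_rook([['.', '.', 'P'], ['R', 'P']]): A returns -1, B raises IndexError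
import Mathlib
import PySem

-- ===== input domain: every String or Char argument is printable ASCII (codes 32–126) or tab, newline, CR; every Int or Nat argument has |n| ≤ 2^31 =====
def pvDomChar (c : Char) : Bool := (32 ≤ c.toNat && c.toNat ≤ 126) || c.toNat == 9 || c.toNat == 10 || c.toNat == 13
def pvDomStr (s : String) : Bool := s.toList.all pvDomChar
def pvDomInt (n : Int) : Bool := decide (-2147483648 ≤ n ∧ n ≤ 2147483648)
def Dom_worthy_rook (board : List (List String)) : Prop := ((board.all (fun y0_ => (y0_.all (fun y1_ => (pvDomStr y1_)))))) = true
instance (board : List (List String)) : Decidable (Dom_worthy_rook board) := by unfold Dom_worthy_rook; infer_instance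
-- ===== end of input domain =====

-- B precomputes a per-cell rook-slide adjacency table once and runs a plain BFS over that
-- graph (seeding each row's first 'R' via slice/index), instead of re-walking the four slide
-- rays inline at every dequeue; objective: alternative decomposition (not claimed faster).

-- ===== PORT A =====
-- board[i][j] (both ports index only where A's bounds checks hold, so the defaults are inert)
def cellAt (board : List (List String)) (i j : Int) : String :=
  PySem.List.pyGetD (PySem.List.pyGetD board i []) j ""

-- the inner `while 0<=nx<rows and 0<=ny<cols and board[nx][ny] != 'P': …` slide of A
-- (fuel-guarded; the fuel passed by worthy_rook exceeds any slide length)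
def slideA (board : List (List String)) (rows cols dx dy mv : Int) :
    Nat → Int → Int → PySem.Set (Int × Int) → List (Int × Int × Int) →
    PySem.Set (Int × Int) × List (Int × Int × Int)
  | 0, _, _, vis, q => (vis, q)
  | Nat.succ f, nx, ny, vis, q =>
    if 0 ≤ nx ∧ nx < rows ∧ 0 ≤ ny ∧ ny < cols ∧ cellAt board nx ny ≠ "P" then
      if PySem.Set.contains vis (nx, ny) then
        slideA board rows cols dx dy mv f (nx + dx) (ny + dy) vis q
      else
        slideA board rows cols dx dy mv f (nx + dx) (ny + dy)
          (PySem.Set.add vis (nx, ny)) (q ++ [(nx, ny, mv + 1)])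
    else (vis, q)

-- A's seed scan: `for j in range(cols): if board[i][j]=='R': append; break` (row = board[i])
def seedScanA (row : List String) (cols i : Int) : Nat → Int → List (Int × Int × Int)
  | 0, _ => []
  | Nat.succ f, j =>
    if j < cols then
      if PySem.List.pyGetD row j "" = "R" then [(i, j, (0 : Int))]
      else seedScanA row cols i f (j + 1)
    else []

-- A's `while queue:` BFS loop (fuel-guarded; worthy_rook passes fuel > all possible pops)
def bfsA (board : List (List String)) (rows cols : Int) (sf : Nat) :
    Nat → List (Int × Int × Int) → PySem.Set (Int × Int) → Int
  | 0, _, _ => -1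
  | _ + 1, [], _ => -1
  | Nat.succ f, (x, y, mv) :: rest, vis =>
    if x = 7 ∧ y = 7 then mv
    else
      let dirs : List (Int × Int) := [(0, 1), (0, -1), (1, 0), (-1, 0)]
      let st := dirs.foldl
        (fun (st : PySem.Set (Int × Int) × List (Int × Int × Int)) d =>
          slideA board rows cols d.1 d.2 mv sf (x + d.1) (y + d.2) st.1 st.2)
        (vis, rest)
      bfsA board rows cols sf f st.2 st.1

def worthy_rook (board : List (List String)) : Int :=
  let rows : Int := PySem.List.len board
  let cols : Int := PySem.List.len (PySem.List.pyGetD board 0 [])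
  let sf : Nat := board.length + (board.headD []).length + 2
  let F : Nat := board.length * (board.headD []).length + board.length + 2
  let queue := (PySem.List.pyRange 0 rows 1).foldl
    (fun q i => q ++ seedScanA (PySem.List.pyGetD board i []) cols i sf 0) []
  bfsA board rows cols sf F queue PySem.Set.empty

-- ===== PORT B =====
-- one slide ray of B: all cells reachable in direction (dx,dy) before a 'P' or the edge
def rayB (board : List (List String)) (rows cols dx dy : Int) : Nat → Int → Int → List (Int × Int)
  | 0, _, _ => []
  | Nat.succ f, nx, ny =>
    if 0 ≤ nx ∧ nx < rows ∧ 0 ≤ ny ∧ ny < cols ∧ cellAt board nx ny ≠ "P" then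
      (nx, ny) :: rayB board rows cols dx dy f (nx + dx) (ny + dy)
    else []

def neighborsB (board : List (List String)) (rows cols : Int) (sf : Nat) (x y : Int) :
    List (Int × Int) :=
  rayB board rows cols 0 1 sf (x + 0) (y + 1) ++
    rayB board rows cols 0 (-1) sf (x + 0) (y + (-1)) ++
    rayB board rows cols 1 0 sf (x + 1) (y + 0) ++
    rayB board rows cols (-1) 0 sf (x + (-1)) (y + 0)

-- B's adjacency table (the nested list comprehension)
def adjB (board : List (List String)) (rows cols : Int) (sf : Nat) :
    List (List (List (Int × Int))) :=
  (PySem.List.pyRange 0 rows 1).map (fun x =>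
    (PySem.List.pyRange 0 cols 1).map (fun y =>
      if cellAt board x y ≠ "P" then neighborsB board rows cols sf x y else []))

-- B's per-row seeding: r = row[:cols]; if 'R' in r: append (i, r.index('R'), 0)
def seedRowB (cols i : Int) (row : List String) : List (Int × Int × Int) :=
  let r := PySem.List.slice row none (some cols)
  if r.contains "R" then
    match PySem.List.index? r "R" with
    | some j => [(i, (j : Int), (0 : Int))]
    | none => []
  else []

-- B's BFS over the precomputed table (fuel-guarded like A's loop)
def bfsB (adj : List (List (List (Int × Int)))) :
    Nat → List (Int × Int × Int) → PySem.Set (Int × Int) → Int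
  | 0, _, _ => -1
  | _ + 1, [], _ => -1
  | Nat.succ f, (x, y, d) :: rest, vis =>
    if x = 7 ∧ y = 7 then d
    else
      let st := (PySem.List.pyGetD (PySem.List.pyGetD adj x []) y []).foldl
        (fun (st : PySem.Set (Int × Int) × List (Int × Int × Int)) c =>
          if PySem.Set.contains st.1 c then st
          else (PySem.Set.add st.1 c, st.2 ++ [(c.1, c.2, d + 1)]))
        (vis, rest)
      bfsB adj f st.2 st.1

def worthy_rook_alt (board : List (List String)) : Int :=
  let rows : Int := PySem.List.len board
  let cols : Int := PySem.List.len (PySem.List.pyGetD board 0 [])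
  let sf : Nat := board.length + (board.headD []).length + 2
  let F : Nat := board.length * (board.headD []).length + board.length + 2
  let adj := adjB board rows cols sf
  let queue := (PySem.List.enumerate board 0).foldl
    (fun q p => q ++ seedRowB cols p.1 p.2) []
  bfsB adj F queue PySem.Set.empty

-- ===== PRECONDITION & SPEC =====
-- Pre_ excludes the empty board (A raises IndexError on board[0]) and boards with a row
-- shorter than row 0, on which indexing every row up to row 0's width raises IndexError in
-- A on almost all of them and in B's table build even where A happens to return.
def Pre_worthy_rook (board : List (List String)) : Prop :=
  board ≠ [] ∧ ∀ row ∈ board, (board.headD []).length ≤ row.length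
instance (board : List (List String)) : Decidable (Pre_worthy_rook board) := by
  unfold Pre_worthy_rook; infer_instance
def pvWitness_worthy_rook : List (List String) := [["R", "."], [".", "P"]]

def Spec_worthy_rook (board : List (List String)) (out : Int) : Prop := out = worthy_rook_alt board
instance (board : List (List String)) (out : Int) : Decidable (Spec_worthy_rook board out) := by unfold Spec_worthy_rook; infer_instance

-- ===== CLAIM (what is proved, stated in full; the proofs are below) =====
def Claim_equal_worthy_rook : Prop := ∀ (board : List (List String)), Dom_worthy_rook board → Pre_worthy_rook board → Spec_worthy_rook board (worthy_rook board)

-- ===== LEMMAS AND PROOFS =====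

-- a queue entry / cell the BFS may expand: in bounds and not a pawn
def GoodCell (board : List (List String)) (rows cols x y : Int) : Prop :=
  0 ≤ x ∧ x < rows ∧ 0 ≤ y ∧ y < cols ∧ cellAt board x y ≠ "P"

-- A's slide is the fold B's BFS performs over the corresponding ray (any shared fuel)
theorem slide_eq_foldl (board : List (List String)) (rows cols dx dy mv : Int) :
    ∀ (f : Nat) (nx ny : Int) (vis : PySem.Set (Int × Int)) (q : List (Int × Int × Int)),
      slideA board rows cols dx dy mv f nx ny vis q
        = (rayB board rows cols dx dy f nx ny).foldl
            (fun (st : PySem.Set (Int × Int) × List (Int × Int × Int)) c =>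
              if PySem.Set.contains st.1 c then st
              else (PySem.Set.add st.1 c, st.2 ++ [(c.1, c.2, mv + 1)]))
            (vis, q) := by
  intro f
  induction f with
  | zero => intro nx ny vis q; simp [slideA, rayB]
  | succ f ih =>
    intro nx ny vis q
    simp only [slideA, rayB]
    split
    · by_cases hv : (nx, ny) ∈ vis
      · rw [if_pos (by simpa [PySem.Set.contains_iff] using hv), ih]
        simp [List.foldl, hv]
      · rw [if_neg (by simpa [PySem.Set.contains_iff] using hv), ih]
        simp [List.foldl, hv]
    · simp

-- members of a ray are expandable cells
theorem ray_good (board : List (List String)) (rows cols dx dy : Int) :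
    ∀ (f : Nat) (nx ny : Int) (c : Int × Int), c ∈ rayB board rows cols dx dy f nx ny →
      GoodCell board rows cols c.1 c.2 := by
  intro f
  induction f with
  | zero => intro nx ny c hc; simp [rayB] at hc
  | succ f ih =>
    intro nx ny c hc
    simp only [rayB] at hc
    split at hc
    · rename_i hg
      rcases List.mem_cons.mp hc with h | h
      · subst h; exact hg
      · exact ih _ _ _ h
    · simp at hc

-- table lookup at an expandable cell returns its precomputed neighbour list
theorem adj_lookup (board : List (List String)) (sf : Nat) (x y : Int)
    (h : GoodCell board (board.length : Int) ((board.headD []).length : Int) x y) :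
    PySem.List.pyGetD (PySem.List.pyGetD
        (adjB board (board.length : Int) ((board.headD []).length : Int) sf) x []) y []
      = neighborsB board (board.length : Int) ((board.headD []).length : Int) sf x y := by
  obtain ⟨hx0, hxr, hy0, hyc, hP⟩ := h
  unfold adjB
  rw [PySem.List.pyGetD_map_pyRange_of_nonneg _ _ _ _ hx0 hxr,
      PySem.List.pyGetD_map_pyRange_of_nonneg _ _ _ _ hy0 hyc]
  simp [hP]

-- the enqueue fold keeps the queue's entries expandable
theorem step_preserves (board : List (List String)) (rows cols mv : Int) :
    ∀ (l : List (Int × Int)) (init : PySem.Set (Int × Int) × List (Int × Int × Int)),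
      (∀ e ∈ init.2, GoodCell board rows cols e.1 e.2.1) →
      (∀ c ∈ l, GoodCell board rows cols c.1 c.2) →
      ∀ e ∈ (l.foldl
          (fun (st : PySem.Set (Int × Int) × List (Int × Int × Int)) c =>
            if PySem.Set.contains st.1 c then st
            else (PySem.Set.add st.1 c, st.2 ++ [(c.1, c.2, mv + 1)])) init).2,
        GoodCell board rows cols e.1 e.2.1 := by
  intro l
  induction l with
  | nil => intro init h _ e he; exact h e he
  | cons c t ih =>
    intro init h hc e he
    rw [List.foldl_cons] at he
    have hnew : ∀ e' ∈ (if PySem.Set.contains init.1 c = true then init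
        else (PySem.Set.add init.1 c, init.2 ++ [(c.1, c.2, mv + 1)])).2,
        GoodCell board rows cols e'.1 e'.2.1 := by
      intro e' he'
      split at he'
      · exact h e' he'
      · rcases List.mem_append.mp he' with h1 | h1
        · exact h e' h1
        · simp only [List.mem_singleton] at h1
          subst h1
          exact hc c (by simp)
    exact ih _ hnew (fun c' h' => hc c' (List.mem_cons_of_mem _ h')) e he

-- the two BFS loops agree step by step on queues of expandable cells
theorem bfs_eq (board : List (List String)) (sf : Nat) :
    ∀ (F : Nat) (q : List (Int × Int × Int)) (vis : PySem.Set (Int × Int)),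
      (∀ e ∈ q, GoodCell board (board.length : Int) ((board.headD []).length : Int) e.1 e.2.1) →
      bfsA board (board.length : Int) ((board.headD []).length : Int) sf F q vis
        = bfsB (adjB board (board.length : Int) ((board.headD []).length : Int) sf) F q vis := by
  intro F
  induction F with
  | zero => intro q vis h; simp [bfsA, bfsB]
  | succ F ih =>
    intro q vis h
    match q with
    | [] => simp [bfsA, bfsB]
    | (x, y, mv) :: rest =>
      have hg : GoodCell board (board.length : Int) ((board.headD []).length : Int) x y :=
        h (x, y, mv) (by simp)
      have hrest : ∀ e ∈ rest,
          GoodCell board (board.length : Int) ((board.headD []).length : Int) e.1 e.2.1 :=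
        fun e he => h e (List.mem_cons_of_mem _ he)
      simp only [bfsA, bfsB]
      by_cases h77 : x = 7 ∧ y = 7
      · simp [h77]
      · simp only [h77, if_neg, not_false_iff]
        rw [adj_lookup board sf x y hg]
        have hS : ∀ e ∈ ((neighborsB board (board.length : Int)
            ((board.headD []).length : Int) sf x y).foldl
            (fun (st : PySem.Set (Int × Int) × List (Int × Int × Int)) c =>
              if PySem.Set.contains st.1 c then st
              else (PySem.Set.add st.1 c, st.2 ++ [(c.1, c.2, mv + 1)])) (vis, rest)).2,
            GoodCell board (board.length : Int) ((board.headD []).length : Int) e.1 e.2.1 := by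
          refine step_preserves board _ _ mv _ _ hrest ?_
          intro c hcm
          simp only [neighborsB, List.mem_append] at hcm
          rcases hcm with ((hc1 | hc2) | hc3) | hc4
          · exact ray_good board _ _ _ _ _ _ _ _ hc1
          · exact ray_good board _ _ _ _ _ _ _ _ hc2
          · exact ray_good board _ _ _ _ _ _ _ _ hc3
          · exact ray_good board _ _ _ _ _ _ _ _ hc4
        simp only [List.foldl]
        rw [slide_eq_foldl, slide_eq_foldl, slide_eq_foldl, slide_eq_foldl]
        simp only [neighborsB, List.foldl_append] at hS ⊢
        exact ih _ _ hS

-- A's fueled first-'R' scan of a full-width row, in terms of index?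
theorem scan_spec (r : List String) (i : Int) :
    ∀ (f k : Nat), r.length - k ≤ f →
      seedScanA r ((r.length : Nat) : Int) i f ((k : Nat) : Int)
        = match PySem.List.index? (r.drop k) "R" with
          | some j => [(i, ((k + j : Nat) : Int), (0 : Int))]
          | none => [] := by
  intro f
  induction f with
  | zero =>
    intro k hk
    have hd : r.drop k = [] := List.drop_eq_nil_of_le (by omega)
    simp [seedScanA, hd, PySem.List.index?_eq_idxOf?]
  | succ f ih =>
    intro k hk
    by_cases hkl : k < r.length
    · have hlt : ((k : Nat) : Int) < ((r.length : Nat) : Int) := by exact_mod_cast hkl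
      have hd : r.drop k = r[k] :: r.drop (k + 1) := List.drop_eq_getElem_cons hkl
      have hget : PySem.List.pyGetD r ((k : Nat) : Int) "" = r[k] := by
        rw [PySem.List.pyGetD_natCast]
        exact List.getD_eq_getElem r "" hkl
      rw [seedScanA, if_pos hlt, hget]
      by_cases hR : r[k] = "R"
      · rw [if_pos hR, hd, hR, PySem.List.index?_cons_self]
        simp
      · rw [if_neg hR,
          show ((k : Nat) : Int) + 1 = (((k + 1 : Nat)) : Int) by push_cast; ring,
          ih (k + 1) (by omega), hd, PySem.List.index?_cons_of_ne _ hR]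
        cases hidx : PySem.List.index? (r.drop (k + 1)) "R" <;> simp <;> omega
    · have hge : ¬ ((k : Nat) : Int) < ((r.length : Nat) : Int) := by exact_mod_cast hkl
      have hd : r.drop k = [] := List.drop_eq_nil_of_le (by omega)
      rw [seedScanA, if_neg hge, hd]
      simp [PySem.List.index?_eq_idxOf?]

-- per full-width row, A's scan and B's slice/index seeding agree
theorem seed_row_eq (r : List String) (i : Int) (f : Nat) (hf : r.length ≤ f) :
    seedScanA r ((r.length : Nat) : Int) i f 0 = seedRowB ((r.length : Nat) : Int) i r := by
  have h := scan_spec r i f 0 (by omega)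
  simp only [Nat.cast_zero, List.drop_zero, Nat.zero_add] at h
  rw [h]
  unfold seedRowB
  rw [PySem.List.slice_to_natCast, List.take_length]
  cases hidx : PySem.List.index? r "R"
  · have hnm : "R" ∉ r := (PySem.List.index?_eq_none_iff r "R").mp hidx
    rw [PySem.List.index?_eq_idxOf?] at hidx
    simp [hnm]
  · have hmem : "R" ∈ r := (PySem.List.index?_isSome_iff r "R").mp (by rw [hidx]; rfl)
    rw [PySem.List.index?_eq_idxOf?] at hidx
    simp [hidx, hmem]

-- A's scan of a row that may be longer than cols only ever reads its first cols cells
theorem scan_take (row : List String) (c : Nat) (hc : c ≤ row.length) (i : Int) :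
    ∀ (f : Nat) (j : Int), 0 ≤ j →
      seedScanA row ((c : Nat) : Int) i f j = seedScanA (row.take c) ((c : Nat) : Int) i f j := by
  intro f
  induction f with
  | zero => intro j hj; rfl
  | succ f ih =>
    intro j hj
    rw [seedScanA, seedScanA]
    by_cases hjc : j < ((c : Nat) : Int)
    · rw [if_pos hjc, if_pos hjc]
      have hjl : j < (row.length : Int) := by omega
      have hjt : j < ((row.take c).length : Int) := by
        simp only [List.length_take]; omega
      have hg : PySem.List.pyGetD row j "" = PySem.List.pyGetD (row.take c) j "" := by
        rw [PySem.List.pyGetD_eq_getElem row "" hj hjl,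
          PySem.List.pyGetD_eq_getElem (row.take c) "" hj hjt]
        exact (List.getElem_take ..).symm
      rw [hg, ih (j + 1) (by omega)]
    · rw [if_neg hjc, if_neg hjc]

-- B's seeding only depends on the first cols cells of the row
theorem seedRowB_take (row : List String) (c : Nat) (i : Int) :
    seedRowB ((c : Nat) : Int) i row = seedRowB ((c : Nat) : Int) i (row.take c) := by
  unfold seedRowB
  rw [PySem.List.slice_to_natCast, PySem.List.slice_to_natCast, List.take_take]
  simp

-- the whole seed queues agree, and their entries are expandable
theorem seeds_eq (board : List (List String)) (sf : Nat)
    (hpre : Pre_worthy_rook board) (hsf : (board.headD []).length ≤ sf) :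
    (PySem.List.pyRange 0 (board.length : Int) 1).foldl
        (fun q i => q ++ seedScanA (PySem.List.pyGetD board i [])
          ((board.headD []).length : Int) i sf 0) []
      = (PySem.List.enumerate board 0).foldl
          (fun q p => q ++ seedRowB ((board.headD []).length : Int) p.1 p.2) [] := by
  rw [PySem.List.foldl_append_eq_flatMap, PySem.List.foldl_append_eq_flatMap,
      PySem.List.enumerate_eq_map_pyRange board ([] : List String)]
  simp only [PySem.List.len_eq, List.nil_append, List.flatMap_map]
  apply List.flatMap_congr
  intro a ha
  obtain ⟨ha0, hau⟩ := PySem.List.mem_pyRange_one.mp ha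
  have hka : ((a.toNat : Nat) : Int) = a := Int.toNat_of_nonneg ha0
  have hkl : a.toNat < board.length := by omega
  have hrow : PySem.List.pyGetD board a [] = board[a.toNat] :=
    PySem.List.pyGetD_eq_getElem board [] ha0 (by exact_mod_cast hau)
  have hlenr : (board.headD []).length ≤ board[a.toNat].length :=
    hpre.2 _ (List.getElem_mem hkl)
  rw [hrow]
  have hrl : (board[a.toNat].take (board.headD []).length).length
      = (board.headD []).length := by
    simp only [List.length_take]; omega
  calc seedScanA board[a.toNat] (((board.headD []).length : Nat) : Int) a sf 0
      = seedScanA (board[a.toNat].take (board.headD []).length)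
          (((board.headD []).length : Nat) : Int) a sf 0 :=
        scan_take board[a.toNat] (board.headD []).length hlenr a sf 0 le_rfl
    _ = seedRowB (((board.headD []).length : Nat) : Int) a
          (board[a.toNat].take (board.headD []).length) := by
        have h2 := seed_row_eq (board[a.toNat].take (board.headD []).length) a sf
          (by rw [hrl]; exact hsf)
        rw [hrl] at h2
        exact h2
    _ = seedRowB (((board.headD []).length : Nat) : Int) a board[a.toNat] :=
        (seedRowB_take board[a.toNat] (board.headD []).length a).symm

-- entries produced by A's seed scan are in bounds and sit on an 'R'
theorem scan_mem (row : List String) (cols i : Int) :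
    ∀ (f : Nat) (j0 : Int) (e : Int × Int × Int), e ∈ seedScanA row cols i f j0 →
      e.1 = i ∧ e.2.2 = 0 ∧ j0 ≤ e.2.1 ∧ e.2.1 < cols ∧
        PySem.List.pyGetD row e.2.1 "" = "R" := by
  intro f
  induction f with
  | zero => intro j0 e he; simp [seedScanA] at he
  | succ f ih =>
    intro j0 e he
    rw [seedScanA] at he
    split at he
    · rename_i hj
      split at he
      · rename_i hr
        simp only [List.mem_singleton] at he
        subst he
        exact ⟨rfl, rfl, le_refl _, hj, hr⟩
      · obtain ⟨h1, h2, h3, h4, h5⟩ := ih _ _ he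
        exact ⟨h1, h2, by omega, h4, h5⟩
    · simp at he

theorem seeds_good (board : List (List String)) (sf : Nat) :
    ∀ e ∈ (PySem.List.pyRange 0 (board.length : Int) 1).foldl
        (fun q i => q ++ seedScanA (PySem.List.pyGetD board i [])
          ((board.headD []).length : Int) i sf 0) [],
      GoodCell board (board.length : Int) ((board.headD []).length : Int) e.1 e.2.1 := by
  intro e he
  rw [PySem.List.foldl_append_eq_flatMap] at he
  simp only [List.nil_append, List.mem_flatMap] at he
  obtain ⟨a, ha, hea⟩ := he
  obtain ⟨ha0, hau⟩ := PySem.List.mem_pyRange_one.mp ha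
  obtain ⟨h1, h2, h3, h4, h5⟩ := scan_mem _ _ _ _ _ _ hea
  unfold GoodCell cellAt
  rw [h1]
  exact ⟨ha0, hau, by omega, h4, by rw [h5]; decide⟩

-- ===== VERDICT (by name: the statement is the Claim_ definition above) =====
theorem worthy_rook_spec : Claim_equal_worthy_rook := by
  intro board hdom hpre
  unfold Spec_worthy_rook
  cases board with
  | nil => exact absurd rfl hpre.1
  | cons b t =>
    unfold worthy_rook worthy_rook_alt
    simp only [PySem.List.len_eq, PySem.List.pyGetD_zero, List.getD_cons_zero,
      List.headD_cons]
    have hseeds := seeds_eq (b :: t) ((b :: t).length + b.length + 2)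
      ⟨List.cons_ne_nil b t, hpre.2⟩ (by simp only [List.headD_cons]; omega)
    simp only [List.headD_cons] at hseeds
    rw [← hseeds]
    have hgood := seeds_good (b :: t) ((b :: t).length + b.length + 2)
    simp only [List.headD_cons] at hgood
    have hb := bfs_eq (b :: t) ((b :: t).length + b.length + 2)
    simp only [List.headD_cons] at hb
    exact hb _ _ _ hgood
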